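-- pv_equiv track=rewrite | github.com/kkr010128/codebert | problem177/problem177_135.py | solve
-- ===== SOURCE A (Python) =====
-- def solve(n,a):
--     wa=0
--     for i in range(n):
--         if(i%2==0):
--             wa+=a[i]
--     kotae=wa
--     for i in range(n//2):
--         wa+=a[(n//2-i-1)*2+1]
--         wa-=a[(n//2-i-1)*2]
--         if(wa>kotae):
--             kotae=wa
--     return kotae
-- ===== SOURCE B (Python) =====
-- def solve(n, a):
--     # Base: sum of even-indexed elements of the first n items.
--     base = sum(a[j] for j in range(0, n, 2))
--     # Delta table: gain of switching pair j from its even to its odd element.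
--     d = [a[2 * j + 1] - a[2 * j] for j in range(n // 2)]
--     # One left-to-right pass: running total and minimum prefix sum of d.
--     # Best answer = base + (total - minimal prefix), the best suffix of deltas.
--     s = 0
--     lo = 0
--     for x in d:
--         s += x
--         if s < lo:
--             lo = s
--     return base + s - lo
-- ===== Notes on version B (the rewrite author's own statement) =====
-- stated objective: alternative
-- what changed: A runs a running sum right-to-left over pair indices computed from the end while tracking a running maximum; B materializes a delta table d[j]=a[2j+1]-a[2j], makes one left-to-right pass tracking the running total and minimum prefix sum, and returns base + total - min_prefix.
import Mathlib
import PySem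

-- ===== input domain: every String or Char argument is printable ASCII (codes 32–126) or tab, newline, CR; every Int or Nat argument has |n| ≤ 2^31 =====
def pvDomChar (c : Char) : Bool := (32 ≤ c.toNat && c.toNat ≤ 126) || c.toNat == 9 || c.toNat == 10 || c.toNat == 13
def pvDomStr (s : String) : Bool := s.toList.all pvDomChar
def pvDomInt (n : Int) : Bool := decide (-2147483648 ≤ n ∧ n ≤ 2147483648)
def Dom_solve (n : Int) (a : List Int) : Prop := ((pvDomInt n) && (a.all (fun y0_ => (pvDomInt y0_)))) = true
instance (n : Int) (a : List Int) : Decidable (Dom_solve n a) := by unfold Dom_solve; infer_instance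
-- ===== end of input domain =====

-- B replaces A's backwards running-max scan by a delta table plus a forward
-- minimum-prefix-sum pass (alternative decomposition, same O(n) cost).

-- ===== PORT A =====
def solve (n : Int) (a : List Int) : Int :=
  let wa : Int := (PySem.List.pyRange 0 n 1).foldl
    (fun wa i => if PySem.Int.mod i 2 == 0 then wa + PySem.List.pyGetD a i 0 else wa) 0
  let kotae := wa
  let r := (PySem.List.pyRange 0 (PySem.Int.floordiv n 2) 1).foldl
    (fun (p : Int × Int) i =>
      let wa := p.1 + PySem.List.pyGetD a ((PySem.Int.floordiv n 2 - i - 1) * 2 + 1) 0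
      let wa := wa - PySem.List.pyGetD a ((PySem.Int.floordiv n 2 - i - 1) * 2) 0
      if wa > p.2 then (wa, wa) else (wa, p.2))
    (wa, kotae)
  r.2

-- ===== PORT B =====
def solve_alt (n : Int) (a : List Int) : Int :=
  let base : Int := (PySem.List.pyRange 0 n 2).foldl
    (fun s j => s + PySem.List.pyGetD a j 0) 0
  let d : List Int := (PySem.List.pyRange 0 (PySem.Int.floordiv n 2) 1).map
    (fun j => PySem.List.pyGetD a (2 * j + 1) 0 - PySem.List.pyGetD a (2 * j) 0)
  let r : Int × Int := d.foldl
    (fun (p : Int × Int) x =>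
      let s := p.1 + x
      (s, if s < p.2 then s else p.2)) (0, 0)
  base + r.1 - r.2

-- ===== PRECONDITION & SPEC =====
-- Python A raises IndexError as soon as n exceeds len(a); those inputs are excluded.
def Pre_solve (n : Int) (a : List Int) : Prop := n ≤ (a.length : Int)
instance (n : Int) (a : List Int) : Decidable (Pre_solve n a) := by unfold Pre_solve; infer_instance
def pvWitness_solve : Int × List Int := (4, [3, -1, 4, 1])

def Spec_solve (n : Int) (a : List Int) (out : Int) : Prop := out = solve_alt n a
instance (n : Int) (a : List Int) (out : Int) : Decidable (Spec_solve n a out) := by unfold Spec_solve; infer_instance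

-- ===== CLAIM (what is proved, stated in full; the proofs are below) =====
def Claim_equal_solve : Prop := ∀ (n : Int) (a : List Int), Dom_solve n a → Pre_solve n a → Spec_solve n a (solve n a)

-- ===== LEMMAS AND PROOFS =====

def pvG (a : List Int) (j : Nat) : Int := a.getD j 0
def pvD (a : List Int) (j : Nat) : Int := pvG a (2 * j + 1) - pvG a (2 * j)

/-- max over all prefix sums (including the empty one) -/
def pvMaxPre : List Int → Int
  | [] => 0
  | x :: l => max 0 (x + pvMaxPre l)

/-- min over all prefix sums (including the empty one) -/
def pvMinPre : List Int → Int
  | [] => 0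
  | x :: l => min 0 (x + pvMinPre l)

theorem pvMaxPre_nonneg : ∀ l : List Int, 0 ≤ pvMaxPre l
  | [] => le_refl 0
  | _ :: _ => le_max_left 0 _

theorem pvMinPre_nonpos : ∀ l : List Int, pvMinPre l ≤ 0
  | [] => le_refl 0
  | _ :: _ => min_le_left 0 _

theorem pvMaxPre_append_singleton (l : List Int) (x : Int) :
    pvMaxPre (l ++ [x]) = max (pvMaxPre l) (l.sum + x) := by
  induction l with
  | nil => simp [pvMaxPre]
  | cons y l ih =>
    simp only [List.cons_append, pvMaxPre, ih, List.sum_cons]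
    omega

theorem pvMaxPre_reverse (l : List Int) :
    pvMaxPre l.reverse = l.sum - pvMinPre l := by
  induction l with
  | nil => rfl
  | cons x l ih =>
    rw [List.reverse_cons, pvMaxPre_append_singleton, ih]
    simp only [pvMinPre, List.sum_reverse, List.sum_cons]
    omega

/-- A's inner loop: running sum with running max, over the delta list. -/
def pvStepA (p : Int × Int) (x : Int) : Int × Int :=
  if p.1 + x > p.2 then (p.1 + x, p.1 + x) else (p.1 + x, p.2)

/-- B's loop: running sum with running min. -/
def pvStepB (p : Int × Int) (x : Int) : Int × Int :=
  (p.1 + x, if p.1 + x < p.2 then p.1 + x else p.2)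

theorem pv_foldlA (l : List Int) : ∀ (w k : Int), w ≤ k →
    l.foldl pvStepA (w, k) = (w + l.sum, max k (w + pvMaxPre l)) := by
  induction l with
  | nil => intro w k h; simp [pvMaxPre]; omega
  | cons x l ih =>
    intro w k h
    have hP := pvMaxPre_nonneg l
    simp only [List.foldl_cons, pvStepA]
    by_cases hc : w + x > k
    · rw [if_pos hc, ih (w + x) (w + x) le_rfl]
      simp only [List.sum_cons, pvMaxPre, Prod.mk.injEq]
      omega
    · rw [if_neg hc, ih (w + x) k (by omega)]
      simp only [List.sum_cons, pvMaxPre, Prod.mk.injEq]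
      omega

theorem pv_foldlB (l : List Int) : ∀ (s lo : Int), lo ≤ s →
    l.foldl pvStepB (s, lo) = (s + l.sum, min lo (s + pvMinPre l)) := by
  induction l with
  | nil => intro s lo h; simp [pvMinPre]; omega
  | cons x l ih =>
    intro s lo h
    have hP := pvMinPre_nonpos l
    simp only [List.foldl_cons, pvStepB]
    by_cases hc : s + x < lo
    · rw [if_pos hc, ih (s + x) (s + x) le_rfl]
      simp only [List.sum_cons, pvMinPre, Prod.mk.injEq]
      omega
    · rw [if_neg hc, ih (s + x) lo (by omega)]
      simp only [List.sum_cons, pvMinPre, Prod.mk.injEq]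
      omega

theorem pv_revMap (f : Nat → Int) (M : Nat) :
    (List.range M).map (fun k => f (M - 1 - k)) = ((List.range M).map f).reverse := by
  induction M with
  | zero => rfl
  | succ M ih =>
    conv_lhs => rw [List.range_succ_eq_map]
    conv_rhs => rw [List.range_succ]
    rw [List.map_cons, List.map_map, List.map_append, List.reverse_append]
    simp only [List.map_cons, List.map_nil, List.reverse_cons, List.reverse_nil,
      List.nil_append, List.cons_append]
    rw [← ih]
    congr 1
    apply List.map_congr_left
    intro k _
    simp only [Function.comp_apply]
    congr 1
    omega

theorem pv_evenSum (G : Nat → Int) (N : Nat) :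
    (List.range N).foldl (fun w i => if i % 2 = 0 then w + G i else w) 0
      = ((List.range ((N + 1) / 2)).map (fun k => G (2 * k))).sum := by
  induction N with
  | zero => rfl
  | succ N ih =>
    rw [List.range_succ, List.foldl_append]
    rcases Nat.mod_two_eq_zero_or_one N with h | h
    · have e1 : (N + 1 + 1) / 2 = (N + 1) / 2 + 1 := by omega
      have e2 : 2 * ((N + 1) / 2) = N := by omega
      rw [e1, List.range_succ, List.map_append, List.sum_append]
      simp [ih, h, e2]
    · have e1 : (N + 1 + 1) / 2 = (N + 1) / 2 := by omega
      rw [e1]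
      simp [ih, h]

-- ===== VERDICT (by name: the statement is the Claim_ definition above) =====
theorem solve_spec : Claim_equal_solve := by
  unfold Claim_equal_solve Spec_solve
  intro n a _ _
  rcases lt_or_ge n 0 with hn | hn
  · -- n < 0: every loop is empty, both sides are 0
    have h1 : PySem.List.pyRange 0 n 1 = [] := PySem.List.pyRange_one_eq_nil (by omega)
    have h2 : PySem.Int.floordiv n 2 ≤ 0 := by
      rw [PySem.Int.floordiv_eq_ediv_of_pos (by norm_num)]; omega
    have h3 : PySem.List.pyRange 0 (PySem.Int.floordiv n 2) 1 = [] :=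
      PySem.List.pyRange_one_eq_nil (by omega)
    have h4 : PySem.List.pyRange 0 n 2 = [] := by
      rw [PySem.List.pyRange_of_pos 0 n (show (0 : Int) < 2 by norm_num)]
      rw [if_neg (by omega)]
      rfl
    simp only [solve, solve_alt]
    rw [h1, h3, h4]
    simp
  · obtain ⟨N, rfl⟩ : ∃ N : Nat, n = (N : Int) := ⟨n.toNat, (Int.toNat_of_nonneg hn).symm⟩
    have hm : PySem.Int.floordiv (N : Int) 2 = ((N / 2 : Nat) : Int) := by
      exact_mod_cast PySem.Int.floordiv_natCast N 2
    set M : Nat := N / 2 with hM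
    -- A's first loop is the sum of the even-indexed prefix elements
    have hA1 : (PySem.List.pyRange 0 (N : Int) 1).foldl
        (fun wa i => if PySem.Int.mod i 2 == 0 then wa + PySem.List.pyGetD a i 0 else wa) 0
        = ((List.range ((N + 1) / 2)).map (fun k => pvG a (2 * k))).sum := by
      rw [PySem.List.pyRange_one]
      simp only [sub_zero, Int.toNat_natCast, List.foldl_map, zero_add]
      rw [PySem.List.foldl_congr_mem _ _
        (fun w (i : Nat) => if i % 2 = 0 then w + pvG a i else w) 0 ?_]
      · exact pv_evenSum (pvG a) N
      · intro w k _
        rw [PySem.Int.mod_eq_emod_of_pos (by norm_num)]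
        rcases Nat.mod_two_eq_zero_or_one k with h | h
        · have hc : ((k : Int)) % 2 = 0 := by omega
          rw [hc]
          simp [pvG, h]
        · have hc : ((k : Int)) % 2 = 1 := by omega
          rw [hc]
          simp [h]
    -- A's second loop is pvStepA over the reversed delta list
    have hA2 : ∀ init : Int × Int,
        (PySem.List.pyRange 0 (PySem.Int.floordiv (N : Int) 2) 1).foldl
          (fun (p : Int × Int) i =>
            if p.1 + PySem.List.pyGetD a ((PySem.Int.floordiv (N : Int) 2 - i - 1) * 2 + 1) 0
                - PySem.List.pyGetD a ((PySem.Int.floordiv (N : Int) 2 - i - 1) * 2) 0 > p.2 then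
              (p.1 + PySem.List.pyGetD a ((PySem.Int.floordiv (N : Int) 2 - i - 1) * 2 + 1) 0
                - PySem.List.pyGetD a ((PySem.Int.floordiv (N : Int) 2 - i - 1) * 2) 0,
               p.1 + PySem.List.pyGetD a ((PySem.Int.floordiv (N : Int) 2 - i - 1) * 2 + 1) 0
                - PySem.List.pyGetD a ((PySem.Int.floordiv (N : Int) 2 - i - 1) * 2) 0)
            else
              (p.1 + PySem.List.pyGetD a ((PySem.Int.floordiv (N : Int) 2 - i - 1) * 2 + 1) 0
                - PySem.List.pyGetD a ((PySem.Int.floordiv (N : Int) 2 - i - 1) * 2) 0, p.2)) init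
        = (((List.range M).map (pvD a)).reverse).foldl pvStepA init := by
      intro init
      rw [hm, PySem.List.pyRange_one]
      simp only [sub_zero, Int.toNat_natCast, List.foldl_map, zero_add]
      rw [PySem.List.foldl_congr_mem _ _
        (fun (p : Int × Int) (k : Nat) => pvStepA p (pvD a (M - 1 - k))) init ?_]
      · rw [← List.foldl_map, pv_revMap]
      · intro p k hk
        have hkM : k < M := List.mem_range.mp hk
        have e1 : ((M : Int) - (k : Int) - 1) * 2 + 1 = ((2 * (M - 1 - k) + 1 : Nat) : Int) := by
          omega
        have e2 : ((M : Int) - (k : Int) - 1) * 2 = ((2 * (M - 1 - k) : Nat) : Int) := by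
          omega
        have e3 : p.1 + a.getD (2 * (M - 1 - k) + 1) 0 - a.getD (2 * (M - 1 - k)) 0
            = p.1 + (a.getD (2 * (M - 1 - k) + 1) 0 - a.getD (2 * (M - 1 - k)) 0) := by ring
        rw [e1, e2]
        simp only [PySem.List.pyGetD_natCast, pvStepA, pvD, pvG]
        rw [e3]
    -- B's base sum
    have hB1 : (PySem.List.pyRange 0 (N : Int) 2).foldl
        (fun s j => s + PySem.List.pyGetD a j 0) 0
        = ((List.range ((N + 1) / 2)).map (fun k => pvG a (2 * k))).sum := by
      rw [PySem.List.pyRange_of_pos 0 (N : Int) (show (0 : Int) < 2 by norm_num)]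
      have eb : (if (0 : Int) < (N : Int) then (((N : Int) - 0 + 2 - 1) / 2).toNat else 0)
          = (N + 1) / 2 := by
        split_ifs <;> omega
      rw [eb, List.foldl_map]
      rw [PySem.List.foldl_congr_mem _ _
        (fun (s : Int) (k : Nat) => s + pvG a (2 * k)) 0 ?_]
      · rw [PySem.List.foldl_add]
        simp
      · intro s k _
        have e : (0 : Int) + 2 * (k : Int) = ((2 * k : Nat) : Int) := by omega
        rw [e, PySem.List.pyGetD_natCast]
        rfl
    -- B's delta list
    have hB2 : (PySem.List.pyRange 0 (PySem.Int.floordiv (N : Int) 2) 1).map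
        (fun j => PySem.List.pyGetD a (2 * j + 1) 0 - PySem.List.pyGetD a (2 * j) 0)
        = (List.range M).map (pvD a) := by
      rw [hm, PySem.List.pyRange_one]
      simp only [sub_zero, Int.toNat_natCast, List.map_map]
      apply List.map_congr_left
      intro k _
      simp only [Function.comp_apply, zero_add]
      have e1 : 2 * ((k : Nat) : Int) + 1 = ((2 * k + 1 : Nat) : Int) := by omega
      have e2 : 2 * ((k : Nat) : Int) = ((2 * k : Nat) : Int) := by omega
      rw [e1, e2, PySem.List.pyGetD_natCast, PySem.List.pyGetD_natCast]
      rfl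
    -- assemble
    simp only [solve, solve_alt, hA1, hB1, hB2]
    rw [hA2, pv_foldlA _ _ _ le_rfl]
    have hfB : ((List.range M).map (pvD a)).foldl
        (fun (p : Int × Int) x => (p.1 + x, if p.1 + x < p.2 then p.1 + x else p.2)) (0, 0)
        = ((0 : Int) + ((List.range M).map (pvD a)).sum,
            min 0 (0 + pvMinPre ((List.range M).map (pvD a)))) := by
      rw [← pv_foldlB _ _ _ le_rfl]
      rfl
    rw [hfB]
    have h5 := pvMaxPre_reverse ((List.range M).map (pvD a))
    have h6 := pvMaxPre_nonneg (((List.range M).map (pvD a)).reverse)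
    have h7 := pvMinPre_nonpos ((List.range M).map (pvD a))
    have h8 := List.sum_reverse ((List.range M).map (pvD a))
    dsimp only
    omega
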